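-- pv_equiv track=rewrite | github.com/initOS/odoo-analyse | src/odoo_analyse/odoo.py | _find_edges_in_loop
-- ===== SOURCE A (Python) =====
-- from functools import reduce
--
-- def _find_edges_in_loop(graph):  # pylint: disable=R0201
--     # Eliminate not referenced and not referring modules
--     while True:
--         before = len(graph)
--
--         tmp = {k: v.intersection(graph) for k, v in graph.items()}
--         deps = reduce(lambda a, b: a.union(b), tmp.values(), set())
--         graph = {k: v for k, v in tmp.items() if v and k in deps}
--
--         after = len(graph)
--         if before == after:
--             break
--
--     return {(a, b) for a, bs in graph.items() for b in bs}
-- ===== SOURCE B (Python) =====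
-- def _find_edges_in_loop(graph):
--     # Worklist peeling: repeatedly discard nodes without an alive successor or
--     # an alive predecessor, touching only the removed node's neighbours.
--     nodes = set(graph)
--     succ = {k: [b for b in v if b in nodes] for k, v in graph.items()}
--     edges = [(b, k) for k, bs in succ.items() for b in bs]
--     pred = {k: [] for k in graph}
--     for b, k in edges:
--         pred[b].append(k)
--     alive = set(graph)
--     queue = list(graph)
--     while queue:
--         k = queue.pop()
--         if k not in alive:
--             continue
--         if any(b in alive for b in succ[k]) and any(j in alive for j in pred[k]):
--             continue
--         alive.discard(k)
--         queue.extend(succ[k])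
--         queue.extend(pred[k])
--     return {(a, v) for a, bs in graph.items() if a in alive for v in bs if v in alive}
-- ===== Notes on version B (the rewrite author's own statement) =====
-- stated objective: faster
-- what changed: A repeatedly rebuilds the whole dict (intersecting every adjacency set and recomputing the union of all values each round until the size stops shrinking); B builds successor/predecessor adjacency once and peels nodes with a worklist, re-examining only the removed node's neighbours, then emits the surviving edges in one scan.
import Mathlib
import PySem

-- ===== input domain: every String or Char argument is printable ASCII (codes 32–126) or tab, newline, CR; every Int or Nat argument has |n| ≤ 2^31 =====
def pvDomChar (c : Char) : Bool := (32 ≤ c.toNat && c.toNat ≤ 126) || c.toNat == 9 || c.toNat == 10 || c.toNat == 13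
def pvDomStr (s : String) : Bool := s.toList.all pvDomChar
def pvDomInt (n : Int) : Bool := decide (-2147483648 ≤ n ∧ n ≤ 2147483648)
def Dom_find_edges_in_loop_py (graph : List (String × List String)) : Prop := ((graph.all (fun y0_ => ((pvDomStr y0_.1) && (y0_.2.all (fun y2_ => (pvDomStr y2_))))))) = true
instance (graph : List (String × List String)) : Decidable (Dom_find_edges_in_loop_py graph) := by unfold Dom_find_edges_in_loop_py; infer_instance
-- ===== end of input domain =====

-- B replaces A's repeated whole-graph filtering rounds with a single worklist peeling
-- pass (remove a node once it has no surviving successor or predecessor, re-examining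
-- only its neighbours); objective: faster.

-- ===== PORT A =====
-- one round of the `while True` body: tmp / deps / filtered graph
def pvStepA (g : PySem.Dict String (PySem.Set String)) : PySem.Dict String (PySem.Set String) :=
  let tmp : PySem.Dict String (PySem.Set String) :=
    PySem.Dict.ofList (g.items.map (fun kv => (kv.1, PySem.Set.inter kv.2 g.keys)))
  let deps : PySem.Set String :=
    tmp.values.foldl (fun a b => PySem.Set.union a b) PySem.Set.empty
  PySem.Dict.ofList (tmp.items.filter (fun kv => !kv.2.isEmpty && PySem.Set.contains deps kv.1))

-- termination helpers for the `while True` loop (the dict strictly shrinks until it stops)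
lemma pv_size_update_le {κ ν : Type} [BEq κ] (l : List (κ × ν)) (d : PySem.Dict κ ν) :
    (d.update l).size ≤ d.size + l.length := by
  induction l generalizing d with
  | nil => simp [PySem.Dict.update]
  | cons p t ih =>
    have h1 : ((d.insert p.1 p.2).update t).size ≤ (d.insert p.1 p.2).size + t.length := ih _
    have h2 : (d.insert p.1 p.2).size ≤ d.size + 1 := by
      rw [PySem.Dict.size_insert]; split <;> omega
    simpa [PySem.Dict.update, List.foldl_cons] using h1.trans (by omega)

lemma pv_size_ofList_le {κ ν : Type} [BEq κ] (l : List (κ × ν)) :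
    (PySem.Dict.ofList l).size ≤ l.length := by
  simpa [PySem.Dict.ofList] using pv_size_update_le l PySem.Dict.empty

lemma pv_size_stepA_le (g : PySem.Dict String (PySem.Set String)) :
    (pvStepA g).size ≤ g.size := by
  unfold pvStepA
  refine (pv_size_ofList_le _).trans ?_
  refine (List.length_filter_le _ _).trans ?_
  refine (pv_size_ofList_le _).trans ?_
  simp [PySem.Dict.size]

def pvLoopA (g : PySem.Dict String (PySem.Set String)) : PySem.Dict String (PySem.Set String) :=
  let g' := pvStepA g
  if h : g'.size = g.size then g' else pvLoopA g'
termination_by g.size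
decreasing_by
  simp only [g'] at h
  have := pv_size_stepA_le g
  omega

def find_edges_in_loop_py (graph : List (String × List String)) : List (String × String) :=
  let g0 : PySem.Dict String (PySem.Set String) :=
    PySem.Dict.ofList (graph.map (fun kv => (kv.1, PySem.Set.ofList kv.2)))
  let gf := pvLoopA g0
  PySem.Set.ofList (gf.items.flatMap (fun kv => kv.2.map (fun b => (kv.1, b))))

-- ===== PORT B =====
-- the `while queue:` worklist loop of Source B (queue.pop() takes the LAST element)
def pvPeel (succ pred : PySem.Dict String (List String)) (alive : PySem.Set String)
    (queue : List String) : PySem.Set String :=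
  match queue with
  | [] => alive
  | q :: qs =>
    let k := (q :: qs).getLast (by simp)
    let rest := (q :: qs).dropLast
    if PySem.Set.contains alive k = false then
      pvPeel succ pred alive rest
    else if ((succ.getD k []).any fun b => PySem.Set.contains alive b) &&
            ((pred.getD k []).any fun j => PySem.Set.contains alive j) then
      pvPeel succ pred alive rest
    else
      pvPeel succ pred (PySem.Set.discard alive k) (rest ++ succ.getD k [] ++ pred.getD k [])
termination_by (alive.length, queue.length)
decreasing_by
  · apply Prod.Lex.right; simp
  · apply Prod.Lex.right; simp
  · apply Prod.Lex.left
    rename_i hc _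
    have hk : (q :: qs).getLast (by simp) ∈ alive := by
      have : PySem.Set.contains alive ((q :: qs).getLast (by simp)) = true := by
        cases h : PySem.Set.contains alive ((q :: qs).getLast (by simp)) with
        | false => exact absurd h hc
        | true => rfl
      simpa [PySem.Set.contains, List.contains_iff_mem] using this
    have : (PySem.Set.discard alive ((q :: qs).getLast (by simp))).length < alive.length := by
      apply List.length_filter_lt_length_iff_exists.mpr
      exact ⟨_, hk, by simp⟩
    simpa [PySem.Set.discard] using this

def find_edges_in_loop_py_alt (graph : List (String × List String)) : List (String × String) :=
  let g0 : PySem.Dict String (PySem.Set String) :=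
    PySem.Dict.ofList (graph.map (fun kv => (kv.1, PySem.Set.ofList kv.2)))
  let nodes : PySem.Set String := PySem.Set.ofList g0.keys
  let succ : PySem.Dict String (List String) :=
    PySem.Dict.ofList (g0.items.map (fun kv => (kv.1, kv.2.filter fun b => PySem.Set.contains nodes b)))
  let edges : List (String × String) :=
    succ.items.flatMap (fun kv => kv.2.map (fun b => (b, kv.1)))
  let pred0 : PySem.Dict String (List String) :=
    PySem.Dict.ofList (g0.keys.map (fun k => (k, ([] : List String))))
  let pred := edges.foldl (fun d p => d.modify p.1 [] (fun l => l ++ [p.2])) pred0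
  let aliveF := pvPeel succ pred (PySem.Set.ofList g0.keys) g0.keys
  PySem.Set.ofList (g0.items.flatMap (fun kv =>
    if PySem.Set.contains aliveF kv.1 then
      (kv.2.filter fun b => PySem.Set.contains aliveF b).map (fun b => (kv.1, b))
    else []))

-- ===== PRECONDITION & SPEC =====
def Spec_find_edges_in_loop_py (graph : List (String × List String)) (out : List (String × String)) : Prop := out = find_edges_in_loop_py_alt graph
instance (graph : List (String × List String)) (out : List (String × String)) : Decidable (Spec_find_edges_in_loop_py graph out) := by unfold Spec_find_edges_in_loop_py; infer_instance

-- ===== CLAIM (what is proved, stated in full; the proofs are below) =====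
def Claim_equal_find_edges_in_loop_py : Prop := ∀ (graph : List (String × List String)), Dom_find_edges_in_loop_py graph → Spec_find_edges_in_loop_py graph (find_edges_in_loop_py graph)

-- ===== LEMMAS AND PROOFS =====

-- a subset S of the graph's nodes is "good" if every node of S keeps an out- and an
-- in-neighbour inside S; both programs compute the largest good subset of the keys
def pvGood (g0 : PySem.Dict String (PySem.Set String)) (S : List String) : Prop :=
  ∀ k ∈ S, (∃ b ∈ g0.getD k [], b ∈ S) ∧ (∃ j ∈ S, k ∈ g0.getD j [])

-- invariant of A's loop: unique keys forming a sublist of the original keys, and each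
-- stored value agrees with the original adjacency once both are cut down to the keys
def pvInvA (g0 g : PySem.Dict String (PySem.Set String)) : Prop :=
  g.keys.Nodup ∧ List.Sublist g.keys g0.keys ∧
  ∀ p ∈ g.items, p.2.filter (fun b => PySem.Set.contains g.keys b)
      = (g0.getD p.1 []).filter (fun b => PySem.Set.contains g.keys b)

lemma pv_dict_ofList_nodup {κ ν : Type} [BEq κ] [LawfulBEq κ] (l : List (κ × ν))
    (h : (l.map Prod.fst).Nodup) : PySem.Dict.ofList l = PySem.Dict.mk l := by
  apply PySem.Dict.ext
  have := PySem.Dict.items_foldl_insert_fresh l Prod.fst Prod.snd PySem.Dict.empty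
      (fun a _ => PySem.Dict.contains_empty _) h
  simpa [PySem.Dict.ofList, PySem.Dict.update] using this

lemma pv_mem_foldl_union (l : List (PySem.Set String)) (s : PySem.Set String) (x : String) :
    x ∈ l.foldl (fun a b => PySem.Set.union a b) s ↔ x ∈ s ∨ ∃ v ∈ l, x ∈ v := by
  induction l generalizing s with
  | nil => simp
  | cons v t ih =>
    rw [List.foldl_cons, ih]
    simp only [PySem.Set.union, PySem.Set.mem_update, List.mem_cons]
    aesop

-- the values of A's `tmp` dict, used to build `deps`
def pvDeps (g : PySem.Dict String (PySem.Set String)) : PySem.Set String :=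
  (g.items.map (fun kv => kv.2.filter (fun b => PySem.Set.contains g.keys b))).foldl
    (fun a b => PySem.Set.union a b) PySem.Set.empty

lemma pv_mem_pvDeps (g : PySem.Dict String (PySem.Set String)) (x : String) :
    x ∈ pvDeps g ↔ ∃ p ∈ g.items, x ∈ p.2 ∧ x ∈ g.keys := by
  unfold pvDeps
  rw [pv_mem_foldl_union]
  simp [List.mem_filter, PySem.Set.empty]

lemma pv_stepA_items (g : PySem.Dict String (PySem.Set String)) (hnd : g.keys.Nodup) :
    (pvStepA g).items =
      (g.items.map (fun kv => (kv.1, kv.2.filter (fun b => PySem.Set.contains g.keys b)))).filter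
        (fun kv => !kv.2.isEmpty && PySem.Set.contains (pvDeps g) kv.1) := by
  unfold pvStepA
  have hfst : (g.items.map (fun kv => (kv.1, PySem.Set.inter kv.2 g.keys))).map Prod.fst
      = g.keys := by
    rw [List.map_map]; rfl
  have h1 : PySem.Dict.ofList (g.items.map (fun kv => (kv.1, PySem.Set.inter kv.2 g.keys)))
      = PySem.Dict.mk (g.items.map (fun kv => (kv.1, PySem.Set.inter kv.2 g.keys))) := by
    apply pv_dict_ofList_nodup
    rw [hfst]; exact hnd
  rw [h1]
  have h2 : ∀ l : List (String × PySem.Set String), (l.map Prod.fst).Nodup →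
      ∀ p : (String × PySem.Set String) → Bool,
      PySem.Dict.ofList (l.filter p) = PySem.Dict.mk (l.filter p) := by
    intro l hl p
    apply pv_dict_ofList_nodup
    exact (List.Sublist.map Prod.fst List.filter_sublist).nodup hl
  rw [h2 _ (by rw [hfst]; exact hnd)]
  simp only [PySem.Dict.values, PySem.Set.inter, pvDeps, List.map_map]
  rfl

lemma pv_getD_of_mem (g : PySem.Dict String (PySem.Set String)) (hnd : g.keys.Nodup)
    {k : String} {v : PySem.Set String} (h : (k, v) ∈ g.items) : g.getD k [] = v := by
  rw [PySem.Dict.getD, PySem.Dict.get?_of_mem_items g h hnd]; rfl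

lemma pv_mem_keys_iff (g : PySem.Dict String (PySem.Set String)) (k : String) :
    k ∈ g.keys ↔ ∃ v, (k, v) ∈ g.items := by
  simp only [PySem.Dict.keys, List.mem_map]
  constructor
  · rintro ⟨p, hp, rfl⟩; exact ⟨p.2, hp⟩
  · rintro ⟨v, hv⟩; exact ⟨(k, v), hv, rfl⟩

-- filter with the smaller key set absorbs a previous filter with the larger one
lemma pv_filter_absorb (w : PySem.Set String) (L L' : List String)
    (hsub : ∀ x, x ∈ L' → x ∈ L) :
    (w.filter (fun b => PySem.Set.contains L b)).filter (fun b => PySem.Set.contains L' b)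
      = w.filter (fun b => PySem.Set.contains L' b) := by
  rw [List.filter_filter]
  apply List.filter_congr
  intro x _
  cases h' : PySem.Set.contains L' x with
  | false => simp
  | true =>
    have hL : x ∈ L := hsub x ((PySem.Set.contains_iff _ _).mp h')
    simp [hL]

lemma pv_step_inv (g0 g : PySem.Dict String (PySem.Set String)) (h : pvInvA g0 g) :
    pvInvA g0 (pvStepA g) := by
  obtain ⟨hnd, hsub, hval⟩ := h
  have hitems := pv_stepA_items g hnd
  have hkeys : List.Sublist (pvStepA g).keys g.keys := by
    rw [PySem.Dict.keys, hitems]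
    have h1 : List.Sublist
        ((g.items.map (fun kv => (kv.1, kv.2.filter (fun b => PySem.Set.contains g.keys b)))).filter
          (fun kv => !kv.2.isEmpty && PySem.Set.contains (pvDeps g) kv.1))
        (g.items.map (fun kv => (kv.1, kv.2.filter (fun b => PySem.Set.contains g.keys b)))) :=
      List.filter_sublist
    have h2 := h1.map Prod.fst
    rw [List.map_map] at h2
    exact h2
  refine ⟨hkeys.nodup hnd, hkeys.trans hsub, ?_⟩
  intro p hp
  rw [hitems] at hp
  obtain ⟨hp', _⟩ := List.mem_filter.mp hp
  obtain ⟨q, hq, rfl⟩ := List.mem_map.mp hp'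
  have hmem : ∀ x, x ∈ (pvStepA g).keys → x ∈ g.keys := fun x hx => hkeys.subset hx
  calc (q.2.filter (fun b => PySem.Set.contains g.keys b)).filter
        (fun b => PySem.Set.contains (pvStepA g).keys b)
      = q.2.filter (fun b => PySem.Set.contains (pvStepA g).keys b) :=
        pv_filter_absorb _ _ _ hmem
    _ = ((g0.getD q.1 []).filter (fun b => PySem.Set.contains g.keys b)).filter
        (fun b => PySem.Set.contains (pvStepA g).keys b) := by
        rw [← pv_filter_absorb q.2 g.keys _ hmem, hval q hq]
    _ = (g0.getD q.1 []).filter (fun b => PySem.Set.contains (pvStepA g).keys b) :=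
        pv_filter_absorb _ _ _ hmem

lemma pv_step_max (g0 g : PySem.Dict String (PySem.Set String)) (h : pvInvA g0 g)
    (S : List String) (hS : pvGood g0 S) (hsub : ∀ x ∈ S, x ∈ g.keys) :
    ∀ x ∈ S, x ∈ (pvStepA g).keys := by
  obtain ⟨hnd, _, hval⟩ := h
  intro x hx
  obtain ⟨v, hv⟩ := (pv_mem_keys_iff g x).mp (hsub x hx)
  obtain ⟨⟨b, hb, hbS⟩, ⟨j, hjS, hj⟩⟩ := hS x hx
  rw [PySem.Dict.keys, pv_stepA_items g hnd]
  apply List.mem_map.mpr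
  refine ⟨(x, v.filter (fun b => PySem.Set.contains g.keys b)), ?_, rfl⟩
  apply List.mem_filter.mpr
  constructor
  · exact List.mem_map.mpr ⟨(x, v), hv, rfl⟩
  · rw [Bool.and_eq_true]
    constructor
    · have hbv : b ∈ v.filter (fun b => PySem.Set.contains g.keys b) := by
        rw [hval (x, v) hv]
        exact List.mem_filter.mpr ⟨hb, (PySem.Set.contains_iff _ _).mpr (hsub b hbS)⟩
      have hne : v.filter (fun b => PySem.Set.contains g.keys b) ≠ [] := List.ne_nil_of_mem hbv
      cases hE : (v.filter (fun b => PySem.Set.contains g.keys b)).isEmpty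
      · rfl
      · exact absurd (List.isEmpty_iff.mp hE) hne
    · apply (PySem.Set.contains_iff _ _).mpr
      apply (pv_mem_pvDeps g x).mpr
      obtain ⟨vj, hvj⟩ := (pv_mem_keys_iff g j).mp (hsub j hjS)
      refine ⟨(j, vj), hvj, ?_, hsub x hx⟩
      have : x ∈ vj.filter (fun b => PySem.Set.contains g.keys b) := by
        rw [hval (j, vj) hvj]
        exact List.mem_filter.mpr ⟨hj, (PySem.Set.contains_iff _ _).mpr (hsub x hx)⟩
      exact (List.mem_filter.mp this).1

lemma pv_step_fix (g0 g : PySem.Dict String (PySem.Set String)) (h : pvInvA g0 g)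
    (hsz : (pvStepA g).size = g.size) :
    (pvStepA g).items
        = g.keys.map (fun k => (k, (g0.getD k []).filter (fun b => PySem.Set.contains g.keys b)))
      ∧ pvGood g0 g.keys := by
  obtain ⟨hnd, hsub, hval⟩ := h
  have hitems := pv_stepA_items g hnd
  set f := fun kv : String × PySem.Set String =>
    (kv.1, kv.2.filter (fun b => PySem.Set.contains g.keys b)) with hf
  set cond := fun kv : String × PySem.Set String =>
    !kv.2.isEmpty && PySem.Set.contains (pvDeps g) kv.1 with hcond
  have hlen : ((g.items.map f).filter cond).length = (g.items.map f).length := by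
    have h1 : (pvStepA g).size = ((g.items.map f).filter cond).length := by
      rw [PySem.Dict.size, hitems]
    have h2 : (g.items.map f).length = g.size := by
      rw [List.length_map]; rfl
    omega
  have hall : ∀ q ∈ g.items.map f, cond q = true := List.length_filter_eq_length_iff.mp hlen
  have hitems' : (pvStepA g).items = g.items.map f := by
    rw [hitems, List.filter_eq_self.mpr hall]
  constructor
  · rw [hitems']
    have hmk : g.items = g.keys.map (fun k => (k, g.getD k [])) :=
      PySem.Dict.items_eq_map_keys g hnd []
    rw [hmk, List.map_map]
    apply List.map_congr_left
    intro k hk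
    obtain ⟨v, hv⟩ := (pv_mem_keys_iff g k).mp hk
    have hg : g.getD k [] = v := pv_getD_of_mem g hnd hv
    simp only [Function.comp, hf]
    rw [hg, hval (k, v) hv]
  · intro k hk
    obtain ⟨v, hv⟩ := (pv_mem_keys_iff g k).mp hk
    have hcondv : cond (f (k, v)) = true := hall _ (List.mem_map.mpr ⟨(k, v), hv, rfl⟩)
    simp only [hcond, hf, Bool.and_eq_true] at hcondv
    obtain ⟨hne, hdep⟩ := hcondv
    constructor
    · have : v.filter (fun b => PySem.Set.contains g.keys b) ≠ [] := by
        intro hniL; rw [hniL] at hne; simp at hne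
      obtain ⟨b, hb⟩ := List.exists_mem_of_ne_nil _ this
      rw [hval (k, v) hv] at hb
      obtain ⟨hb1, hb2⟩ := List.mem_filter.mp hb
      exact ⟨b, hb1, (PySem.Set.contains_iff _ _).mp hb2⟩
    · obtain ⟨p, hp, hxp, _⟩ := (pv_mem_pvDeps g k).mp ((PySem.Set.contains_iff _ _).mp hdep)
      have hkp : k ∈ p.2.filter (fun b => PySem.Set.contains g.keys b) :=
        List.mem_filter.mpr ⟨hxp, (PySem.Set.contains_iff _ _).mpr hk⟩
      rw [hval p hp] at hkp
      obtain ⟨hk1, _⟩ := List.mem_filter.mp hkp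
      refine ⟨p.1, ?_, hk1⟩
      exact List.mem_map.mpr ⟨p, hp, rfl⟩

lemma pv_loopA_fix_case (g0 g : PySem.Dict String (PySem.Set String)) (hinv : pvInvA g0 g)
    (h' : (pvStepA g).size = g.size) :
    ∃ K, List.Sublist K g0.keys ∧ pvGood g0 K ∧
      (pvLoopA g).items = K.map (fun k => (k, (g0.getD k []).filter (fun b => PySem.Set.contains K b)))
      ∧ (∀ S, pvGood g0 S → (∀ x ∈ S, x ∈ g.keys) → ∀ x ∈ S, x ∈ K) := by
  obtain ⟨hfix1, hfix2⟩ := pv_step_fix g0 g hinv h'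
  refine ⟨g.keys, hinv.2.1, hfix2, ?_, fun S _ hs => hs⟩
  rw [pvLoopA, dif_pos h']
  exact hfix1

lemma pv_loopA_spec (g0 : PySem.Dict String (PySem.Set String)) (n : Nat) :
    ∀ g, g.size ≤ n → pvInvA g0 g →
    ∃ K, List.Sublist K g0.keys ∧ pvGood g0 K ∧
      (pvLoopA g).items = K.map (fun k => (k, (g0.getD k []).filter (fun b => PySem.Set.contains K b)))
      ∧ (∀ S, pvGood g0 S → (∀ x ∈ S, x ∈ g.keys) → ∀ x ∈ S, x ∈ K) := by
  induction n with
  | zero =>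
    intro g hsz hinv
    have h' : (pvStepA g).size = g.size := by
      have := pv_size_stepA_le g; omega
    exact pv_loopA_fix_case g0 g hinv h'
  | succ n ih =>
    intro g hsz hinv
    by_cases h' : (pvStepA g).size = g.size
    · exact pv_loopA_fix_case g0 g hinv h'
    · have hlt : (pvStepA g).size < g.size := by
        have := pv_size_stepA_le g; omega
      obtain ⟨K, hK1, hK2, hK3, hK4⟩ := ih (pvStepA g) (by omega) (pv_step_inv g0 g hinv)
      refine ⟨K, hK1, hK2, ?_, ?_⟩
      · rw [pvLoopA, dif_neg h']
        exact hK3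
      · intro S hSg hSsub
        exact hK4 S hSg (pv_step_max g0 g hinv S hSg hSsub)

-- a node "violates" when it has no alive successor or no alive predecessor
def pvViol (succ pred : PySem.Dict String (List String)) (alive : PySem.Set String) (k : String) : Prop :=
  (¬ ∃ b ∈ succ.getD k [], b ∈ alive) ∨ (¬ ∃ j ∈ pred.getD k [], j ∈ alive)

lemma pv_peel_spec (g0 : PySem.Dict String (PySem.Set String))
    (succ pred : PySem.Dict String (List String)) (ks : List String)
    (hsucc : ∀ k b, b ∈ succ.getD k [] ↔ b ∈ g0.getD k [] ∧ b ∈ ks)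
    (hpred : ∀ k j, j ∈ pred.getD k [] ↔ j ∈ ks ∧ k ∈ succ.getD j []) :
    ∀ (alive : PySem.Set String) (queue : List String), (∀ x ∈ alive, x ∈ ks) →
      (∀ k ∈ alive, pvViol succ pred alive k → k ∈ queue) →
      (∀ x ∈ pvPeel succ pred alive queue, x ∈ alive)
      ∧ (∀ k ∈ pvPeel succ pred alive queue, ¬ pvViol succ pred (pvPeel succ pred alive queue) k)
      ∧ (∀ S, pvGood g0 S → (∀ x ∈ S, x ∈ ks) → (∀ x ∈ S, x ∈ alive) →
          ∀ x ∈ S, x ∈ pvPeel succ pred alive queue) := by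
  intro alive queue
  induction alive, queue using pvPeel.induct succ pred with
  | case1 alive =>
    intro _ hq
    rw [pvPeel]
    exact ⟨fun x hx => hx, fun k hk hviol => absurd (hq k hk hviol) (List.not_mem_nil),
      fun S _ _ hSa x hx => hSa x hx⟩
  | case2 alive q qs k rest hdead ih =>
    have hqd : rest ++ [k] = q :: qs := List.dropLast_append_getLast (by simp)
    have heq : pvPeel succ pred alive (q :: qs) = pvPeel succ pred alive rest := by
      rw [pvPeel]
      simp only [show (q :: qs).getLast (by simp) = k from rfl,
        show (q :: qs).dropLast = rest from rfl, hdead]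
      rfl
    intro ha hq
    rw [heq]
    apply ih ha
    intro k' hk' hviol
    have hmem := hq k' hk' hviol
    rw [← hqd, List.mem_append, List.mem_singleton] at hmem
    rcases hmem with h | h
    · exact h
    · rw [h] at hk'
      rw [(PySem.Set.contains_iff alive k).mpr hk'] at hdead
      simp at hdead
  | case3 alive q qs k rest hlive hfine ih =>
    have hqd : rest ++ [k] = q :: qs := List.dropLast_append_getLast (by simp)
    have heq : pvPeel succ pred alive (q :: qs) = pvPeel succ pred alive rest := by
      rw [pvPeel]
      simp only [show (q :: qs).getLast (by simp) = k from rfl,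
        show (q :: qs).dropLast = rest from rfl, hlive, hfine]
      rfl
    intro ha hq
    rw [heq]
    apply ih ha
    intro k' hk' hviol
    have hmem := hq k' hk' hviol
    rw [← hqd, List.mem_append, List.mem_singleton] at hmem
    rcases hmem with h | h
    · exact h
    · rw [h] at hviol
      rw [Bool.and_eq_true] at hfine
      obtain ⟨h1a, h2a⟩ := hfine
      obtain ⟨b, hb, hba⟩ := List.any_eq_true.mp h1a
      obtain ⟨j, hj, hja⟩ := List.any_eq_true.mp h2a
      rcases hviol with hV | hV
      · exact absurd ⟨b, hb, (PySem.Set.contains_iff _ _).mp hba⟩ hV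
      · exact absurd ⟨j, hj, (PySem.Set.contains_iff _ _).mp hja⟩ hV
  | case4 alive q qs k rest hlive hfine ih =>
    have hqd : rest ++ [k] = q :: qs := List.dropLast_append_getLast (by simp)
    have heq : pvPeel succ pred alive (q :: qs)
        = pvPeel succ pred (alive.discard k) (rest ++ succ.getD k [] ++ pred.getD k []) := by
      rw [pvPeel]
      simp only [show (q :: qs).getLast (by simp) = k from rfl,
        show (q :: qs).dropLast = rest from rfl, hlive, hfine]
      rfl
    intro ha hq
    have hkal : k ∈ alive := by
      cases hb : PySem.Set.contains alive k with
      | false => exact absurd hb hlive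
      | true => exact (PySem.Set.contains_iff _ _).mp hb
    have hviolk : pvViol succ pred alive k := by
      by_cases h1a : ((succ.getD k []).any fun b => PySem.Set.contains alive b) = true
      · right
        intro hex
        obtain ⟨j, hj, hja⟩ := hex
        apply hfine
        rw [Bool.and_eq_true]
        exact ⟨h1a, List.any_eq_true.mpr ⟨j, hj, (PySem.Set.contains_iff _ _).mpr hja⟩⟩
      · left
        intro hex
        obtain ⟨b, hb, hba⟩ := hex
        exact h1a (List.any_eq_true.mpr ⟨b, hb, (PySem.Set.contains_iff _ _).mpr hba⟩)
    have ha' : ∀ x ∈ alive.discard k, x ∈ ks := fun x hx =>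
      ha x ((PySem.Set.mem_discard _ _ _).mp hx).1
    have hq' : ∀ k' ∈ alive.discard k, pvViol succ pred (alive.discard k) k' →
        k' ∈ rest ++ succ.getD k [] ++ pred.getD k [] := by
      intro k' hk' hviol'
      obtain ⟨hk'al, hk'ne⟩ := (PySem.Set.mem_discard _ _ _).mp hk'
      by_cases hv : pvViol succ pred alive k'
      · have hmem := hq k' hk'al hv
        rw [← hqd, List.mem_append, List.mem_singleton] at hmem
        rcases hmem with h | h
        · exact List.mem_append.mpr (Or.inl (List.mem_append.mpr (Or.inl h)))
        · exact absurd h hk'ne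
      · rw [pvViol, not_or, not_not, not_not] at hv
        obtain ⟨⟨b, hbs, hba⟩, ⟨j, hjp, hja⟩⟩ := hv
        rcases hviol' with hV | hV
        · have hbk : b = k := by
            by_contra hne
            exact hV ⟨b, hbs, (PySem.Set.mem_discard _ _ _).mpr ⟨hba, hne⟩⟩
          rw [hbk] at hbs
          have : k' ∈ pred.getD k [] := (hpred k k').mpr ⟨ha k' hk'al, hbs⟩
          exact List.mem_append.mpr (Or.inr this)
        · have hjk : j = k := by
            by_contra hne
            exact hV ⟨j, hjp, (PySem.Set.mem_discard _ _ _).mpr ⟨hja, hne⟩⟩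
          rw [hjk] at hjp
          have : k' ∈ succ.getD k [] := ((hpred k' k).mp hjp).2
          exact List.mem_append.mpr (Or.inl (List.mem_append.mpr (Or.inr this)))
    obtain ⟨C1, C2, C3⟩ := ih ha' hq'
    rw [heq]
    refine ⟨fun x hx => ((PySem.Set.mem_discard _ _ _).mp (C1 x hx)).1, C2, ?_⟩
    intro S hSg hSks hSal
    have hkS : k ∉ S := by
      intro hkS
      obtain ⟨⟨b, hbadj, hbS⟩, ⟨j, hjS, hkadj⟩⟩ := hSg k hkS
      apply hviolk.elim
      · intro hV
        exact hV ⟨b, (hsucc k b).mpr ⟨hbadj, hSks b hbS⟩, hSal b hbS⟩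
      · intro hV
        exact hV ⟨j, (hpred k j).mpr ⟨hSks j hjS, (hsucc j k).mpr ⟨hkadj, hSks k hkS⟩⟩,
          hSal j hjS⟩
    exact C3 S hSg hSks (fun x hx =>
      (PySem.Set.mem_discard _ _ _).mpr ⟨hSal x hx, fun hxe => hkS (hxe ▸ hx)⟩)

-- first-match lookup in an items list (what Dict.getD computes)
def pvLk (l : List (String × PySem.Set String)) (k : String) : PySem.Set String :=
  (Option.map (fun x => x.2) (l.find? (fun p => p.1 == k))).getD []

lemma pv_flatMap_congr {α β : Type} (l : List α) (f g : α → List β)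
    (h : ∀ x ∈ l, f x = g x) : l.flatMap f = l.flatMap g := by
  induction l with
  | nil => rfl
  | cons x t ih =>
    rw [List.flatMap_cons, List.flatMap_cons, h x List.mem_cons_self,
      ih (fun y hy => h y (List.mem_cons_of_mem _ hy))]

lemma pv_contains_cons_ne (r : List String) (a x : String) (h : x ≠ a) :
    PySem.Set.contains (a :: r) x = PySem.Set.contains r x := by
  rw [Bool.eq_iff_iff, PySem.Set.contains_iff, PySem.Set.contains_iff]
  simp [h]

-- emitting the edge set from the surviving key list K equals scanning the original
-- items and keeping the pairs whose endpoints survive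
lemma pv_emit_eq (Ki : List String) :
    ∀ (l : List (String × PySem.Set String)) (K : List String),
      (l.map Prod.fst).Nodup → List.Sublist K (l.map Prod.fst) →
      K.flatMap (fun k => ((pvLk l k).filter (fun b => PySem.Set.contains Ki b)).map (fun b => (k, b)))
      = l.flatMap (fun kv => if PySem.Set.contains K kv.1 then
          (kv.2.filter (fun b => PySem.Set.contains Ki b)).map (fun b => (kv.1, b)) else []) := by
  intro l
  induction l with
  | nil =>
    intro K _ hK
    rw [List.sublist_nil.mp hK]
    rfl
  | cons p t ih =>
    intro K hnd hK
    have hpt : p.1 ∉ t.map Prod.fst := (List.nodup_cons.mp hnd).1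
    have hndt := (List.nodup_cons.mp hnd).2
    rcases List.sublist_cons_iff.mp hK with hK' | ⟨r, rfl, hr⟩
    · have hp1K : p.1 ∉ K := fun h => hpt (hK'.subset h)
      have hcont : PySem.Set.contains K p.1 = false := by
        cases hc : PySem.Set.contains K p.1 with
        | false => rfl
        | true => exact absurd ((PySem.Set.contains_iff _ _).mp hc) hp1K
      rw [List.flatMap_cons, hcont]
      simp only [Bool.false_eq_true, if_false, List.nil_append]
      rw [← ih K hndt hK']
      apply pv_flatMap_congr
      intro k hkK
      have hkne : p.1 ≠ k := fun h => hp1K (h ▸ hkK)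
      have : pvLk (p :: t) k = pvLk t k := by
        unfold pvLk
        rw [List.find?_cons_of_neg]
        simp [hkne]
      rw [this]
    · have hp1r : p.1 ∉ r := fun h => hpt (hr.subset h)
      have hcont : PySem.Set.contains (p.1 :: r) p.1 = true :=
        (PySem.Set.contains_iff _ _).mpr List.mem_cons_self
      rw [List.flatMap_cons, List.flatMap_cons, hcont]
      simp only [if_true]
      have hhead : pvLk (p :: t) p.1 = p.2 := by
        unfold pvLk
        rw [List.find?_cons_of_pos (by simp)]
        rfl
      rw [hhead]
      congr 1
      have hstep1 : r.flatMap (fun k =>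
          ((pvLk (p :: t) k).filter (fun b => PySem.Set.contains Ki b)).map (fun b => (k, b)))
          = r.flatMap (fun k =>
          ((pvLk t k).filter (fun b => PySem.Set.contains Ki b)).map (fun b => (k, b))) := by
        apply pv_flatMap_congr
        intro k hkK
        have hkne : p.1 ≠ k := fun h => hp1r (h ▸ hkK)
        have : pvLk (p :: t) k = pvLk t k := by
          unfold pvLk
          rw [List.find?_cons_of_neg]
          simp [hkne]
        rw [this]
      rw [hstep1, ih r hndt hr]
      apply pv_flatMap_congr
      intro kv hkv
      have hne : kv.1 ≠ p.1 := by
        intro h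
        exact hpt (h ▸ List.mem_map.mpr ⟨kv, hkv, rfl⟩)
      rw [pv_contains_cons_ne r p.1 kv.1 hne]

lemma pv_getD_ofList_map (g0 : PySem.Dict String (PySem.Set String)) (hnd : g0.keys.Nodup)
    (f : PySem.Set String → PySem.Set String) (k : String) :
    (PySem.Dict.ofList (g0.items.map (fun kv => (kv.1, f kv.2)))).getD k []
      = (match g0.get? k with
         | some v => f v
         | none => []) := by
  have hks : ((g0.items.map (fun kv => (kv.1, f kv.2))).map Prod.fst) = g0.keys := by
    rw [List.map_map]; rfl
  rw [pv_dict_ofList_nodup _ (by rw [hks]; exact hnd)]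
  show (Option.map (fun x => x.2)
      ((g0.items.map (fun kv => (kv.1, f kv.2))).find? (fun p => p.1 == k))).getD [] = _
  rw [List.find?_map]
  show (Option.map (fun x => x.2)
      (Option.map (fun kv => (kv.1, f kv.2)) (g0.items.find? (fun p => p.1 == k)))).getD [] = _
  cases hfind : g0.items.find? (fun p => p.1 == k) with
  | none => simp [PySem.Dict.get?, hfind]
  | some p => simp [PySem.Dict.get?, hfind]

lemma pv_succ_char (g0 : PySem.Dict String (PySem.Set String)) (hnd : g0.keys.Nodup) :
    ∀ k b, b ∈ (PySem.Dict.ofList (g0.items.map (fun kv =>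
        (kv.1, kv.2.filter fun b => PySem.Set.contains (PySem.Set.ofList g0.keys) b)))).getD k []
      ↔ b ∈ g0.getD k [] ∧ b ∈ g0.keys := by
  intro k b
  rw [pv_getD_ofList_map g0 hnd (fun v => v.filter fun b => PySem.Set.contains (PySem.Set.ofList g0.keys) b) k]
  cases hget : g0.get? k with
  | none =>
    simp [PySem.Dict.getD, hget]
  | some v =>
    simp only [PySem.Dict.getD, hget, Option.getD_some, List.mem_filter]
    rw [PySem.Set.contains_iff, PySem.Set.mem_ofList]

lemma pv_pred0_getD (g0 : PySem.Dict String (PySem.Set String)) (hnd : g0.keys.Nodup) (c : String) :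
    (PySem.Dict.ofList (g0.keys.map (fun k => (k, ([] : List String))))).getD c [] = [] := by
  have hks : ((g0.keys.map (fun k => (k, ([] : List String)))).map Prod.fst) = g0.keys := by
    rw [List.map_map]
    show List.map id g0.keys = g0.keys
    exact List.map_id _
  rw [pv_dict_ofList_nodup _ (by rw [hks]; exact hnd)]
  show (Option.map (fun x => x.2)
      ((g0.keys.map (fun k => (k, ([] : List String)))).find? (fun p => p.1 == c))).getD [] = []
  cases hfind : (g0.keys.map (fun k => (k, ([] : List String)))).find? (fun p => p.1 == c) with
  | none => rfl
  | some p =>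
    have hm := List.mem_of_find?_eq_some hfind
    obtain ⟨k, _, rfl⟩ := List.mem_map.mp hm
    rfl

lemma pv_pred_char (g0 : PySem.Dict String (PySem.Set String)) (hnd : g0.keys.Nodup) :
    ∀ k j, j ∈ ((((PySem.Dict.ofList (g0.items.map (fun kv =>
          (kv.1, kv.2.filter fun b => PySem.Set.contains (PySem.Set.ofList g0.keys) b)))).items.flatMap
            (fun kv => kv.2.map (fun b => (b, kv.1)))).foldl
          (fun d p => d.modify p.1 [] (fun l => l ++ [p.2]))
          (PySem.Dict.ofList (g0.keys.map (fun k => (k, ([] : List String)))))).getD k [])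
      ↔ j ∈ g0.keys ∧ k ∈ (PySem.Dict.ofList (g0.items.map (fun kv =>
          (kv.1, kv.2.filter fun b => PySem.Set.contains (PySem.Set.ofList g0.keys) b)))).getD j [] := by
  intro k j
  set succT := PySem.Dict.ofList (g0.items.map (fun kv =>
      (kv.1, kv.2.filter fun b => PySem.Set.contains (PySem.Set.ofList g0.keys) b))) with hS
  have hSkeys : succT.keys = g0.keys := by
    rw [hS, pv_dict_ofList_nodup _ (by rw [List.map_map]; exact hnd), PySem.Dict.keys]
    rw [List.map_map]
    rfl
  have hSnd : succT.keys.Nodup := by rw [hSkeys]; exact hnd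
  rw [PySem.Dict.getD_foldl_modify_append, pv_pred0_getD g0 hnd k, List.nil_append]
  constructor
  · intro hj
    obtain ⟨p, hpf, rfl⟩ := List.mem_map.mp hj
    obtain ⟨hpe, hpc⟩ := List.mem_filter.mp hpf
    have hp1 : p.1 = k := by simpa using hpc
    obtain ⟨kv, hkv, hpm⟩ := List.mem_flatMap.mp hpe
    obtain ⟨b, hbm, hbe⟩ := List.mem_map.mp hpm
    have h1 : b = p.1 := by rw [← hbe]
    have h2 : kv.1 = p.2 := by rw [← hbe]
    constructor
    · rw [← h2, ← hSkeys]
      exact List.mem_map.mpr ⟨kv, hkv, rfl⟩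
    · have hkv' : (p.2, kv.2) ∈ succT.items := by
        rw [← h2]
        simpa using hkv
      have := pv_getD_of_mem succT hSnd hkv'
      rw [this]
      rw [← hp1, ← h1]
      exact hbm
  · rintro ⟨hjks, hkj⟩
    have hjk' : j ∈ succT.keys := by rw [hSkeys]; exact hjks
    obtain ⟨v, hv⟩ := (pv_mem_keys_iff succT j).mp hjk'
    have hgd := pv_getD_of_mem succT hSnd hv
    rw [hgd] at hkj
    apply List.mem_map.mpr
    refine ⟨(k, j), ?_, rfl⟩
    apply List.mem_filter.mpr
    refine ⟨?_, by simp⟩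
    apply List.mem_flatMap.mpr
    exact ⟨(j, v), hv, List.mem_map.mpr ⟨k, hkj, rfl⟩⟩

lemma pv_main (g0 : PySem.Dict String (PySem.Set String)) (hnd : g0.keys.Nodup)
    (succ pred : PySem.Dict String (List String))
    (hsucc : ∀ k b, b ∈ succ.getD k [] ↔ b ∈ g0.getD k [] ∧ b ∈ g0.keys)
    (hpred : ∀ k j, j ∈ pred.getD k [] ↔ j ∈ g0.keys ∧ k ∈ succ.getD j []) :
    PySem.Set.ofList ((pvLoopA g0).items.flatMap (fun kv => kv.2.map (fun b => (kv.1, b))))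
      = PySem.Set.ofList (g0.items.flatMap (fun kv =>
          if PySem.Set.contains (pvPeel succ pred (PySem.Set.ofList g0.keys) g0.keys) kv.1 then
            (kv.2.filter fun b =>
              PySem.Set.contains (pvPeel succ pred (PySem.Set.ofList g0.keys) g0.keys) b).map
              (fun b => (kv.1, b))
          else [])) := by
  have hinv0 : pvInvA g0 g0 := by
    refine ⟨hnd, List.Sublist.refl _, ?_⟩
    intro p hp
    have hp' : (p.1, p.2) ∈ g0.items := by simpa using hp
    rw [pv_getD_of_mem g0 hnd hp']
  obtain ⟨K, hKsub, hKgood, hKitems, hKmax⟩ := pv_loopA_spec g0 g0.size g0 le_rfl hinv0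
  obtain ⟨hA1, hA2, hA3⟩ := pv_peel_spec g0 succ pred g0.keys hsucc hpred
      (PySem.Set.ofList g0.keys) g0.keys
      (fun x hx => (PySem.Set.mem_ofList _ _).mp hx)
      (fun k hk _ => (PySem.Set.mem_ofList _ _).mp hk)
  have hAsub : ∀ x ∈ pvPeel succ pred (PySem.Set.ofList g0.keys) g0.keys, x ∈ g0.keys :=
    fun x hx => (PySem.Set.mem_ofList _ _).mp (hA1 x hx)
  have hAgood : pvGood g0 (pvPeel succ pred (PySem.Set.ofList g0.keys) g0.keys) := by
    intro kk hk
    have h2 := hA2 kk hk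
    rw [pvViol, not_or, not_not, not_not] at h2
    obtain ⟨⟨b, hb, hba⟩, ⟨j, hj, hja⟩⟩ := h2
    exact ⟨⟨b, ((hsucc kk b).mp hb).1, hba⟩, ⟨j, hja, ((hsucc j kk).mp ((hpred kk j).mp hj).2).1⟩⟩
  have hKA : ∀ x, x ∈ K ↔ x ∈ pvPeel succ pred (PySem.Set.ofList g0.keys) g0.keys := by
    intro x
    constructor
    · intro hx
      exact hA3 K hKgood (fun y hy => hKsub.subset hy)
          (fun y hy => (PySem.Set.mem_ofList _ _).mpr (hKsub.subset hy)) x hx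
    · intro hx
      exact hKmax (pvPeel succ pred (PySem.Set.ofList g0.keys) g0.keys) hAgood hAsub x hx
  have hc : ∀ x, PySem.Set.contains (pvPeel succ pred (PySem.Set.ofList g0.keys) g0.keys) x
      = PySem.Set.contains K x := by
    intro x
    rw [Bool.eq_iff_iff, PySem.Set.contains_iff, PySem.Set.contains_iff]
    exact (hKA x).symm
  congr 1
  rw [hKitems, List.flatMap_map]
  simp only [hc]
  exact pv_emit_eq K g0.items K hnd hKsub

theorem find_edges_in_loop_py_spec : Claim_equal_find_edges_in_loop_py := by
  intro graph _
  show find_edges_in_loop_py graph = find_edges_in_loop_py_alt graph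
  unfold find_edges_in_loop_py find_edges_in_loop_py_alt
  exact pv_main _ (PySem.Dict.nodup_keys_ofList _) _ _
    (pv_succ_char _ (PySem.Dict.nodup_keys_ofList _))
    (pv_pred_char _ (PySem.Dict.nodup_keys_ofList _))
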